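-- pv_equiv track=rewrite | github.com/peanuts1414/PoC-Project | src/generate-JSON.py | detect_windows
-- ===== SOURCE A (Python) =====
-- def detect_windows(cycle_values):
--     start_rows = [0]
--     for i in range(1, len(cycle_values)):
--         if cycle_values[i] < cycle_values[i-1]:
--             start_rows.append(i)
--     windows = []
--     for i in range(len(start_rows)):
--         start = start_rows[i]
--         end = start_rows[i+1] if i+1 < len(start_rows) else len(cycle_values)
--         size = end - start
--         windows.append((start, end, size))
--     return windows
-- ===== SOURCE B (Python) =====
-- def detect_windows(cycle_values):
--     n = len(cycle_values)
--     windows = []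
--     start = 0
--     for i in range(1, n):
--         if cycle_values[i] < cycle_values[i-1]:
--             windows.append((start, i, i - start))
--             start = i
--     windows.append((start, n, n - start))
--     return windows
-- ===== Notes on version B (the rewrite author's own statement) =====
-- stated objective: simpler
-- what changed: Fuses A's two passes (collect start indices, then re-index them to build windows) into one pass that keeps just the current window's start and emits each window at the moment of a decrease, plus a final trailing window.
import Mathlib
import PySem

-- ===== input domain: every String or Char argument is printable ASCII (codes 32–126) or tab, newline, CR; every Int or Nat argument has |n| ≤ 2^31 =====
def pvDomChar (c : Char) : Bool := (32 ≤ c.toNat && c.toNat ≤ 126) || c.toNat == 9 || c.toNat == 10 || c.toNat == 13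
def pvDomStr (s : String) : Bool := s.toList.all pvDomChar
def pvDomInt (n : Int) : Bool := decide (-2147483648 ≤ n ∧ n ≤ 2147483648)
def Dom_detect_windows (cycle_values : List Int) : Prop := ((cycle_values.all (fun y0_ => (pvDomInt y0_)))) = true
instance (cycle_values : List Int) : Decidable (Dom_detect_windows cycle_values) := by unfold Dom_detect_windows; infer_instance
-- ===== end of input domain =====

-- B fuses A's two passes into one pass that tracks the current window's start; same O(n) cost, fewer passes.

-- ===== PORT A =====
-- indices i, i-1, and start_rows indices are always in range in Python, so pyGetD with default 0 is exact here
def detect_windows (cycle_values : List Int) : List (Int × Int × Int) :=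
  let n : Int := cycle_values.length
  let start_rows : List Int :=
    (PySem.List.pyRange 1 n 1).foldl
      (fun sr i =>
        if PySem.List.pyGetD cycle_values i 0 < PySem.List.pyGetD cycle_values (i-1) 0
        then sr ++ [i] else sr) [0]
  (PySem.List.pyRange 0 (start_rows.length : Int) 1).foldl
    (fun w i =>
      let start := PySem.List.pyGetD start_rows i 0
      let e := if i + 1 < (start_rows.length : Int) then PySem.List.pyGetD start_rows (i+1) 0 else n
      let size := e - start
      w ++ [(start, e, size)]) []

-- ===== PORT B =====
def detect_windows_alt (cycle_values : List Int) : List (Int × Int × Int) :=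
  let n : Int := cycle_values.length
  let p : List (Int × Int × Int) × Int :=
    (PySem.List.pyRange 1 n 1).foldl
      (fun ws i =>
        if PySem.List.pyGetD cycle_values i 0 < PySem.List.pyGetD cycle_values (i-1) 0
        then (ws.1 ++ [(ws.2, i, i - ws.2)], i) else ws) ([], 0)
  p.1 ++ [(p.2, n, n - p.2)]

-- ===== PRECONDITION & SPEC =====
def Spec_detect_windows (cycle_values : List Int) (out : List (Int × Int × Int)) : Prop := out = detect_windows_alt cycle_values
instance (cycle_values : List Int) (out : List (Int × Int × Int)) : Decidable (Spec_detect_windows cycle_values out) := by unfold Spec_detect_windows; infer_instance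

-- ===== CLAIM (what is proved, stated in full; the proofs are below) =====
def Claim_equal_detect_windows : Prop := ∀ (cycle_values : List Int), Dom_detect_windows cycle_values → Spec_detect_windows cycle_values (detect_windows cycle_values)

-- ===== LEMMAS AND PROOFS =====

/-- Windows read off a nonempty list of start rows: adjacent pairs, last one closed by `n`. -/
def pairsW (n : Int) : List Int → List (Int × Int × Int)
  | [] => []
  | [a] => [(a, n, n - a)]
  | a :: b :: r => (a, b, b - a) :: pairsW n (b :: r)

theorem pairsW_append_last (n m : Int) (sr : List Int) (h : sr ≠ []) :
    pairsW n (sr ++ [m]) = pairsW m sr ++ [(m, n, n - m)] := by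
  induction sr with
  | nil => exact absurd rfl h
  | cons a t ih =>
    cases t with
    | nil => simp [pairsW]
    | cons b r =>
      show pairsW n (a :: b :: (r ++ [m])) = _
      rw [show pairsW n (a :: b :: (r ++ [m])) = (a, b, b - a) :: pairsW n (b :: (r ++ [m])) from rfl]
      rw [show pairsW m (a :: b :: r) = (a, b, b - a) :: pairsW m (b :: r) from rfl]
      rw [show (b :: (r ++ [m])) = (b :: r) ++ [m] from rfl, ih (by simp)]
      simp

/-- A fold that only appends one element per index is a map. -/
theorem foldl_append_map {α β : Type} (g : α → β) (l : List α) (acc : List β) :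
    l.foldl (fun w i => w ++ [g i]) acc = acc ++ l.map g := by
  induction l generalizing acc with
  | nil => simp
  | cons x t ih => simp [ih]

/-- Shift a Python list index across a cons cell (nonnegative index). -/
theorem pyGetD_cons_add_one (a : Int) (l : List Int) (i : Int) (hi : 0 ≤ i) (d : Int) :
    PySem.List.pyGetD (a :: l) (i + 1) d = PySem.List.pyGetD l i d := by
  obtain ⟨k, rfl⟩ := Int.eq_ofNat_of_zero_le hi
  rw [show ((k : Int) + 1) = ((k + 1 : Nat) : Int) by push_cast; ring]
  rw [PySem.List.pyGetD_natCast, PySem.List.pyGetD_natCast]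
  simp [List.getD]

/-- A's second pass, indexing into the start-row list, produces exactly `pairsW` (Nat-range form). -/
theorem map_windows_eq_pairsW (n : Int) (sr : List Int) (h : sr ≠ []) :
    (List.range sr.length).map
      (fun (k : Nat) =>
        ((PySem.List.pyGetD sr ((k : Int)) 0,
          (if (k : Int) + 1 < (sr.length : Int) then PySem.List.pyGetD sr ((k : Int)+1) 0 else n),
          (if (k : Int) + 1 < (sr.length : Int) then PySem.List.pyGetD sr ((k : Int)+1) 0 else n)
            - PySem.List.pyGetD sr ((k : Int)) 0) : Int × Int × Int)) = pairsW n sr := by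
  induction sr with
  | nil => exact absurd rfl h
  | cons a t ih =>
    cases t with
    | nil => simp [pairsW, PySem.List.pyGetD_natCast]
    | cons b r =>
      have step : List.range (a :: b :: r).length
          = 0 :: (List.range (b :: r).length).map Nat.succ := by
        simp [List.range_succ_eq_map]
      rw [step]
      simp only [List.map_cons, List.map_map]
      rw [show pairsW n (a :: b :: r) = (a, b, b - a) :: pairsW n (b :: r) from rfl]
      congr 1
      · have h1 : ((0:Nat) : Int) + 1 < ((a :: b :: r).length : Int) := by
          simp only [List.length_cons]
          push_cast
          omega
        have e1 : PySem.List.pyGetD (a :: b :: r) (((0:Nat) : Int) + 1) 0 = b := by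
          rw [pyGetD_cons_add_one a (b :: r) ((0:Nat) : Int) (by positivity) 0]
          rw [PySem.List.pyGetD_natCast]
          rfl
        have e0 : PySem.List.pyGetD (a :: b :: r) (((0:Nat)) : Int) 0 = a := by
          rw [PySem.List.pyGetD_natCast]
          rfl
        rw [if_pos h1, e1, e0]
      · rw [← ih (by simp)]
        apply List.map_congr_left
        intro k _
        simp only [Function.comp, Nat.succ_eq_add_one]
        push_cast
        rw [pyGetD_cons_add_one a (b :: r) ((k:Int) + 1) (by positivity) 0]
        rw [pyGetD_cons_add_one a (b :: r) ((k:Int)) (by positivity) 0]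
        have hcond : ((k:Int) + 1 + 1 < ((a :: b :: r).length : Int))
            ↔ ((k:Int) + 1 < ((b :: r).length : Int)) := by
          simp only [List.length_cons]
          push_cast
          omega
        by_cases hk : (k : Int) + 1 < ((b :: r).length : Int)
        · rw [if_pos (hcond.mpr hk), if_pos hk]
        · rw [if_neg (fun hh => hk (hcond.mp hh)), if_neg hk]

/-- A's second pass in its literal foldl form. -/
theorem second_pass (n : Int) (sr : List Int) (h : sr ≠ []) :
    (PySem.List.pyRange 0 (sr.length : Int) 1).foldl
      (fun w i =>
        let start := PySem.List.pyGetD sr i 0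
        let e := if i + 1 < (sr.length : Int) then PySem.List.pyGetD sr (i+1) 0 else n
        let size := e - start
        w ++ [(start, e, size)]) [] = pairsW n sr := by
  show (PySem.List.pyRange 0 (sr.length : Int) 1).foldl
      (fun w i => w ++ [((PySem.List.pyGetD sr i 0,
          (if i + 1 < (sr.length : Int) then PySem.List.pyGetD sr (i+1) 0 else n),
          (if i + 1 < (sr.length : Int) then PySem.List.pyGetD sr (i+1) 0 else n)
            - PySem.List.pyGetD sr i 0) : Int × Int × Int)]) [] = pairsW n sr
  rw [foldl_append_map, List.nil_append]
  rw [PySem.List.pyRange_one, List.map_map]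
  rw [show (((sr.length : Int) - 0).toNat) = sr.length by simp]
  rw [← map_windows_eq_pairsW n sr h]
  apply List.map_congr_left
  intro k _
  simp only [Function.comp, zero_add]

/-- The step functions of the two first passes, named. -/
def stepA (cv : List Int) (sr : List Int) (i : Int) : List Int :=
  if PySem.List.pyGetD cv i 0 < PySem.List.pyGetD cv (i-1) 0 then sr ++ [i] else sr

def stepB (cv : List Int) (ws : List (Int × Int × Int) × Int) (i : Int) : List (Int × Int × Int) × Int :=
  if PySem.List.pyGetD cv i 0 < PySem.List.pyGetD cv (i-1) 0 then (ws.1 ++ [(ws.2, i, i - ws.2)], i) else ws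

/-- Invariant tying A's start-row list to B's (windows, start) state over the shared scan. -/
theorem scan_invariant (cv : List Int) (m : Nat) :
    ((PySem.List.pyRange 1 (m : Int) 1).foldl (stepA cv) [0] ≠ []) ∧
    ∀ X : Int, pairsW X ((PySem.List.pyRange 1 (m : Int) 1).foldl (stepA cv) [0])
      = ((PySem.List.pyRange 1 (m : Int) 1).foldl (stepB cv) ([], 0)).1
        ++ [(((PySem.List.pyRange 1 (m : Int) 1).foldl (stepB cv) ([], 0)).2, X,
             X - ((PySem.List.pyRange 1 (m : Int) 1).foldl (stepB cv) ([], 0)).2)] := by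
  induction m with
  | zero =>
    rw [PySem.List.pyRange_one_eq_nil (by omega : ((0:Nat):Int) ≤ 1)]
    exact ⟨by simp, fun X => by simp [pairsW]⟩
  | succ m ih =>
    by_cases hm : m = 0
    · subst hm
      rw [PySem.List.pyRange_one_eq_nil (by omega : (((0+1 : Nat)):Int) ≤ 1)]
      exact ⟨by simp, fun X => by simp [pairsW]⟩
    · have hsplit : PySem.List.pyRange 1 ((m+1 : Nat) : Int) 1
          = PySem.List.pyRange 1 (m : Int) 1 ++ [(m : Int)] := by
        rw [show (((m+1 : Nat)) : Int) = (m : Int) + 1 by push_cast; ring]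
        exact PySem.List.pyRange_one_succ_right (by omega)
      rw [hsplit]
      simp only [List.foldl_append, List.foldl_cons, List.foldl_nil]
      obtain ⟨hne, hinv⟩ := ih
      set sr := (PySem.List.pyRange 1 (m : Int) 1).foldl (stepA cv) [0] with hsr
      set p := (PySem.List.pyRange 1 (m : Int) 1).foldl (stepB cv) ([], 0) with hp
      unfold stepA stepB
      by_cases hc : PySem.List.pyGetD cv (m : Int) 0 < PySem.List.pyGetD cv ((m : Int)-1) 0
      · simp only [hc, if_pos]
        refine ⟨by simp, fun X => ?_⟩
        rw [pairsW_append_last X (m : Int) sr hne, hinv (m : Int)]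
      · simp only [hc, if_neg, not_false_iff]
        exact ⟨hne, hinv⟩

-- ===== VERDICT (by name: the statement is the Claim_ definition above) =====
theorem detect_windows_spec : Claim_equal_detect_windows := by
  intro cv _
  obtain ⟨hne, hinv⟩ := scan_invariant cv cv.length
  show detect_windows cv = detect_windows_alt cv
  calc detect_windows cv
      = pairsW ((cv.length : Nat) : Int)
          ((PySem.List.pyRange 1 ((cv.length : Nat) : Int) 1).foldl (stepA cv) [0]) :=
        second_pass _ _ hne
    _ = detect_windows_alt cv := by rw [hinv ((cv.length : Nat) : Int)]; rfl
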